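-- pv_equiv track=rewrite | github.com/wenxingfang/FastSim_ML | DataPrepare/FastSim/GAN/CEPC/FS/ana_pan_eff.py | findLed_abs
-- ===== SOURCE A (Python) =====
-- def findLed_abs(X, Y, Z, vPDG, pdg ):
--     max_ = -1
--     index = -1
--     for i in range(len(X)):
--         if abs(vPDG[i]) != pdg:continue
--         if (X[i]*X[i] + Y[i]*Y[i] + Z[i]*Z[i]) > max_ :
--             max_ = (X[i]*X[i] + Y[i]*Y[i] + Z[i]*Z[i])
--             index = i
--     return index
-- ===== SOURCE B (Python) =====
-- def findLed_abs(X, Y, Z, vPDG, pdg):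
--     candidates = [i for i in range(len(X)) if abs(vPDG[i]) == pdg]
--     order = sorted(candidates, key=lambda i: X[i]*X[i] + Y[i]*Y[i] + Z[i]*Z[i], reverse=True)
--     return order[0] if order else -1
-- ===== Notes on version B (the rewrite author's own statement) =====
-- stated objective: alternative
-- what changed: Replaces A's single combined scan carrying a (max_, index) accumulator with filter-then-sort: collect the matching indices, stable-sort them by squared distance in descending order, and return the head (stability of Python's sort makes the head the first maximal index, matching A's strict-> first-wins tie rule); trades O(n) for O(n log n). Pre_ excludes only inputs where A raises IndexError (vPDG shorter than X, or a matching index beyond Y or Z).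
import Mathlib
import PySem

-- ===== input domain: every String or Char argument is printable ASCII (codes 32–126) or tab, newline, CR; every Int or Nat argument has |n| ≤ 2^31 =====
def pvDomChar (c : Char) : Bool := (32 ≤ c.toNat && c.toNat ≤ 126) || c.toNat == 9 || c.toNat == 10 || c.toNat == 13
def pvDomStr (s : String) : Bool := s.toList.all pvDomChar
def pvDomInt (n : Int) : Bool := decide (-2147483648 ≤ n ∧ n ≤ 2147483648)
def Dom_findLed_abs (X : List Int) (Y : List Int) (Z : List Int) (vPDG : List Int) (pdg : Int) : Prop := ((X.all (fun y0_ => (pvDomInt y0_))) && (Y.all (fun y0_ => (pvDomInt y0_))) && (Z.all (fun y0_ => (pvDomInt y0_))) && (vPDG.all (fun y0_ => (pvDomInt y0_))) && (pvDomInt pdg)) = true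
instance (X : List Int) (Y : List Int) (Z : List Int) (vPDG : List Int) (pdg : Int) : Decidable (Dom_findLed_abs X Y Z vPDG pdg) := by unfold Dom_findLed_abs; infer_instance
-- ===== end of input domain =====

-- B replaces A's single accumulator scan with filter-then-stable-descending-sort, returning
-- the head of the sorted candidate list (objective: alternative algorithm, not faster).

-- ===== PORT A =====
def findLed_abs (X : List Int) (Y : List Int) (Z : List Int) (vPDG : List Int) (pdg : Int) : Int :=
  ((PySem.List.pyRange 0 X.length 1).foldl
    (fun (st : Int × Int) i =>
      if |PySem.List.pyGetD vPDG i 0| ≠ pdg then st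
      else if PySem.List.pyGetD X i 0 * PySem.List.pyGetD X i 0
              + PySem.List.pyGetD Y i 0 * PySem.List.pyGetD Y i 0
              + PySem.List.pyGetD Z i 0 * PySem.List.pyGetD Z i 0 > st.1 then
        (PySem.List.pyGetD X i 0 * PySem.List.pyGetD X i 0
          + PySem.List.pyGetD Y i 0 * PySem.List.pyGetD Y i 0
          + PySem.List.pyGetD Z i 0 * PySem.List.pyGetD Z i 0, i)
      else st)
    (-1, -1)).2

-- ===== PORT B =====
def findLed_abs_alt (X : List Int) (Y : List Int) (Z : List Int) (vPDG : List Int) (pdg : Int) : Int :=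
  let candidates := (PySem.List.pyRange 0 X.length 1).filter
    (fun i => decide (|PySem.List.pyGetD vPDG i 0| = pdg))
  let order := PySem.List.sorted candidates
    (fun i => PySem.List.pyGetD X i 0 * PySem.List.pyGetD X i 0
            + PySem.List.pyGetD Y i 0 * PySem.List.pyGetD Y i 0
            + PySem.List.pyGetD Z i 0 * PySem.List.pyGetD Z i 0) true
  match order with
  | [] => -1
  | i :: _ => i

-- ===== PRECONDITION & SPEC =====
-- Pre_ excludes exactly the inputs where Python A raises IndexError: vPDG shorter than X,
-- or a matching index reaching past the end of Y or Z.
def Pre_findLed_abs (X : List Int) (Y : List Int) (Z : List Int) (vPDG : List Int) (pdg : Int) : Prop :=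
  X.length ≤ vPDG.length ∧
  ∀ i : Nat, i < X.length → |vPDG.getD i 0| = pdg → (i < Y.length ∧ i < Z.length)
instance (X : List Int) (Y : List Int) (Z : List Int) (vPDG : List Int) (pdg : Int) : Decidable (Pre_findLed_abs X Y Z vPDG pdg) := by unfold Pre_findLed_abs; infer_instance

def pvWitness_findLed_abs : List Int × List Int × List Int × List Int × Int :=
  ([3, 1], [0, 2], [0, 2], [11, -11], 11)

def Spec_findLed_abs (X : List Int) (Y : List Int) (Z : List Int) (vPDG : List Int) (pdg : Int) (out : Int) : Prop := out = findLed_abs_alt X Y Z vPDG pdg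
instance (X : List Int) (Y : List Int) (Z : List Int) (vPDG : List Int) (pdg : Int) (out : Int) : Decidable (Spec_findLed_abs X Y Z vPDG pdg out) := by unfold Spec_findLed_abs; infer_instance

-- ===== CLAIM (what is proved, stated in full; the proofs are below) =====
def Claim_equal_findLed_abs : Prop := ∀ (X : List Int) (Y : List Int) (Z : List Int) (vPDG : List Int) (pdg : Int), Dom_findLed_abs X Y Z vPDG pdg → Pre_findLed_abs X Y Z vPDG pdg → Spec_findLed_abs X Y Z vPDG pdg (findLed_abs X Y Z vPDG pdg)

-- ===== LEMMAS AND PROOFS =====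

-- Inserting x with the descending comparator changes the head exactly like max?'s fold step.
theorem head?_insertBy {α κ : Type} [LinearOrder κ] (key : α → κ) (x : α) (acc : List α) :
    (PySem.List.insertBy (fun a b => decide (key b < key a)) x acc).head? =
      match acc.head? with
      | none => some x
      | some h => if key h < key x then some x else some h := by
  cases acc with
  | nil => rfl
  | cons h t =>
    simp only [PySem.List.insertBy]
    by_cases hlt : key h < key x <;> simp [hlt]

-- The head of Python's stable reverse=True sort is the FIRST maximal element, i.e. max?.
theorem head?_sorted_rev {α κ : Type} [LinearOrder κ] (xs : List α) (key : α → κ) :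
    (PySem.List.sorted xs key true).head? = PySem.List.max? xs key := by
  have aux : ∀ (l : List α) (acc : List α),
      (l.foldl (fun acc x => PySem.List.insertBy (fun a b => decide (key b < key a)) x acc) acc).head?
        = l.foldl (fun (o : Option α) x =>
            match o with
            | none => some x
            | some m => if key m < key x then some x else some m) acc.head? := by
    intro l
    induction l with
    | nil => intro acc; rfl
    | cons x t ih =>
      intro acc
      simp only [List.foldl_cons]
      rw [ih, head?_insertBy]
  simpa [PySem.List.sorted, PySem.List.max?] using aux xs []

theorem max?_snoc {α κ : Type} [LT κ] [DecidableLT κ] (xs : List α) (y : α) (key : α → κ) :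
    PySem.List.max? (xs ++ [y]) key =
      match PySem.List.max? xs key with
      | none => some y
      | some m => if key m < key y then some y else some m := by
  simp only [PySem.List.max?, List.foldl_append, List.foldl_cons, List.foldl_nil]
  rfl

-- A's loop over any index list, with an always-nonnegative key, computes exactly
-- (key of argmax, argmax) of the filtered indices (or (-1, -1) when none matches).
theorem loop_inv (p : Int → Prop) [DecidablePred p] (k : Int → Int) (hk : ∀ i, 0 ≤ k i)
    (l : List Int) :
    l.foldl (fun (st : Int × Int) i =>
        if p i then (if k i > st.1 then (k i, i) else st) else st) (-1, -1)
      = match PySem.List.max? (l.filter (fun i => decide (p i))) k with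
        | none => ((-1 : Int), (-1 : Int))
        | some m => (k m, m) := by
  induction l using List.reverseRecOn with
  | nil => rfl
  | append_singleton l x ih =>
    rw [List.foldl_append, ih, List.filter_append]
    by_cases hx : p x
    · simp only [List.filter_cons, List.filter_nil, hx, decide_true, if_true]
      rw [max?_snoc]
      cases hm : PySem.List.max? (l.filter (fun i => decide (p i))) k with
      | none =>
        have : (-1 : Int) < k x := lt_of_lt_of_le (by norm_num) (hk x)
        simp [hx, this]
      | some m =>
        simp only [List.foldl_cons, List.foldl_nil, hx, if_true, gt_iff_lt]
        by_cases hlt : k m < k x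
        · simp [hlt]
        · simp [hlt]
    · simp [hx]

theorem findLed_abs_spec : Claim_equal_findLed_abs := by
  intro X Y Z vPDG pdg _ _
  unfold Spec_findLed_abs findLed_abs findLed_abs_alt
  have hrw : (fun (st : Int × Int) i =>
      if |PySem.List.pyGetD vPDG i 0| ≠ pdg then st
      else if PySem.List.pyGetD X i 0 * PySem.List.pyGetD X i 0
              + PySem.List.pyGetD Y i 0 * PySem.List.pyGetD Y i 0
              + PySem.List.pyGetD Z i 0 * PySem.List.pyGetD Z i 0 > st.1 then
        (PySem.List.pyGetD X i 0 * PySem.List.pyGetD X i 0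
          + PySem.List.pyGetD Y i 0 * PySem.List.pyGetD Y i 0
          + PySem.List.pyGetD Z i 0 * PySem.List.pyGetD Z i 0, i)
      else st)
      = (fun (st : Int × Int) i =>
        if |PySem.List.pyGetD vPDG i 0| = pdg then
          (if (fun j => PySem.List.pyGetD X j 0 * PySem.List.pyGetD X j 0
              + PySem.List.pyGetD Y j 0 * PySem.List.pyGetD Y j 0
              + PySem.List.pyGetD Z j 0 * PySem.List.pyGetD Z j 0) i > st.1 then
            ((fun j => PySem.List.pyGetD X j 0 * PySem.List.pyGetD X j 0
              + PySem.List.pyGetD Y j 0 * PySem.List.pyGetD Y j 0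
              + PySem.List.pyGetD Z j 0 * PySem.List.pyGetD Z j 0) i, i)
          else st)
        else st) := by
    funext st i
    by_cases h : |PySem.List.pyGetD vPDG i 0| = pdg <;> simp [h]
  rw [hrw, loop_inv (fun i => |PySem.List.pyGetD vPDG i 0| = pdg)
      (fun j => PySem.List.pyGetD X j 0 * PySem.List.pyGetD X j 0
              + PySem.List.pyGetD Y j 0 * PySem.List.pyGetD Y j 0
              + PySem.List.pyGetD Z j 0 * PySem.List.pyGetD Z j 0)
      (fun j => by nlinarith [mul_self_nonneg (PySem.List.pyGetD X j 0), mul_self_nonneg (PySem.List.pyGetD Y j 0), mul_self_nonneg (PySem.List.pyGetD Z j 0)])]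
  have hb := head?_sorted_rev ((PySem.List.pyRange 0 X.length 1).filter
      (fun i => decide (|PySem.List.pyGetD vPDG i 0| = pdg)))
      (fun i => PySem.List.pyGetD X i 0 * PySem.List.pyGetD X i 0
              + PySem.List.pyGetD Y i 0 * PySem.List.pyGetD Y i 0
              + PySem.List.pyGetD Z i 0 * PySem.List.pyGetD Z i 0)
  rw [← hb]
  cases hs : PySem.List.sorted ((PySem.List.pyRange 0 X.length 1).filter
      (fun i => decide (|PySem.List.pyGetD vPDG i 0| = pdg)))
      (fun i => PySem.List.pyGetD X i 0 * PySem.List.pyGetD X i 0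
              + PySem.List.pyGetD Y i 0 * PySem.List.pyGetD Y i 0
              + PySem.List.pyGetD Z i 0 * PySem.List.pyGetD Z i 0) true with
  | nil => simp [hs]
  | cons h t => simp [hs]
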